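-- pv_equiv track=rewrite | github.com/jlucasldm/ufbaBCC | 2021.2/linguagens_formais_e_automatos/listas/semana_7/frase_completa.py | solucao
-- ===== SOURCE A (Python) =====
-- def solucao(frase):
--     letras = ['a', 'b', 'c', 'd', 'e', 'f', 'g', 'h', 'i', 'j', 'k', 'l', 'm', 'n', 'o', 'p', 'q', 'r', 's', 't', 'u', 'v', 'w', 'x', 'y', 'z']
--     count = 0
--
--     for i in letras:
--         if frase.find(i) != -1:
--             count += 1
--
--     if count == 26:
--         return "frase completa"
--     elif count >= 13:
--         return "frase quase completa"
--     else:
--         return "frase mal elaborada"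
-- ===== SOURCE B (Python) =====
-- def solucao(frase):
--     present = set()
--     for c in frase:
--         if 'a' <= c <= 'z':
--             present.add(c)
--     n = len(present)
--     if n == 26:
--         return "frase completa"
--     elif n >= 13:
--         return "frase quase completa"
--     else:
--         return "frase mal elaborada"
-- ===== Notes on version B (the rewrite author's own statement) =====
-- stated objective: simpler
-- what changed: Instead of scanning the whole string 26 times with find (one pass per alphabet letter), B makes a single pass over the string collecting the distinct lowercase letters into a set and classifies by its size.
import Mathlib
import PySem

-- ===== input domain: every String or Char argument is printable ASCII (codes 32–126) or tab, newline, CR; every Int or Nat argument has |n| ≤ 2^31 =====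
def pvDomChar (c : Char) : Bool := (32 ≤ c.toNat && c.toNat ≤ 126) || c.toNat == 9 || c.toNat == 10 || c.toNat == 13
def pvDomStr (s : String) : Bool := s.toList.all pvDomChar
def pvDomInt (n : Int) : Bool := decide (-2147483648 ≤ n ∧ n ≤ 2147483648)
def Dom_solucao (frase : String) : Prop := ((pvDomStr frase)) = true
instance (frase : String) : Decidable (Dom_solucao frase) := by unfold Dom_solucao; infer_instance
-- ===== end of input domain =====

-- B replaces A's 26 whole-string find scans (one per alphabet letter) by a single pass over the
-- string collecting the distinct lowercase letters into a set; objective: simpler, same value.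

-- ===== PORT A =====
def solucao (frase : String) : String :=
  let letras : List String := ["a", "b", "c", "d", "e", "f", "g", "h", "i", "j", "k", "l", "m",
                               "n", "o", "p", "q", "r", "s", "t", "u", "v", "w", "x", "y", "z"]
  let count : Int := letras.foldl (fun count i => if PySem.Str.find frase i ≠ -1 then count + 1 else count) 0
  if count = 26 then "frase completa"
  else if count ≥ 13 then "frase quase completa"
  else "frase mal elaborada"

-- ===== PORT B =====
def solucao_alt (frase : String) : String :=
  let present : PySem.Set Char :=
    frase.toList.foldl (fun present c => if 'a' ≤ c ∧ c ≤ 'z' then PySem.Set.add present c else present) PySem.Set.empty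
  let n : Int := PySem.Set.len present
  if n = 26 then "frase completa"
  else if n ≥ 13 then "frase quase completa"
  else "frase mal elaborada"

-- ===== PRECONDITION & SPEC =====
def Spec_solucao (frase : String) (out : String) : Prop := out = solucao_alt frase
instance (frase : String) (out : String) : Decidable (Spec_solucao frase out) := by unfold Spec_solucao; infer_instance

-- ===== CLAIM (what is proved, stated in full; the proofs are below) =====
def Claim_equal_solucao : Prop := ∀ (frase : String), Dom_solucao frase → Spec_solucao frase (solucao frase)

-- ===== LEMMAS AND PROOFS =====

def pvAlpha : List Char := ['a', 'b', 'c', 'd', 'e', 'f', 'g', 'h', 'i', 'j', 'k', 'l', 'm',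
                            'n', 'o', 'p', 'q', 'r', 's', 't', 'u', 'v', 'w', 'x', 'y', 'z']

-- A's letras is pvAlpha's letters as one-char strings
lemma letras_eq_map : (["a", "b", "c", "d", "e", "f", "g", "h", "i", "j", "k", "l", "m",
    "n", "o", "p", "q", "r", "s", "t", "u", "v", "w", "x", "y", "z"] : List String)
    = pvAlpha.map (fun c => String.ofList [c]) := by decide

lemma char_eq_of_toNat {c d : Char} (h : c.toNat = d.toNat) : c = d :=
  Char.ext (UInt32.toNat_inj.mp h)

lemma mem_pvAlpha_iff (c : Char) : c ∈ pvAlpha ↔ ('a' ≤ c ∧ c ≤ 'z') := by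
  constructor
  · intro h
    fin_cases h <;> exact ⟨by decide, by decide⟩
  · rintro ⟨h1, h2⟩
    have h1' : 97 ≤ c.toNat := h1
    have h2' : c.toNat ≤ 122 := h2
    have hmap : pvAlpha.map Char.toNat
        = [97, 98, 99, 100, 101, 102, 103, 104, 105, 106, 107, 108, 109,
           110, 111, 112, 113, 114, 115, 116, 117, 118, 119, 120, 121, 122] := by decide
    have hm : c.toNat ∈ pvAlpha.map Char.toNat := by
      rw [hmap]; simp only [List.mem_cons, List.not_mem_nil, or_false]; omega
    obtain ⟨d, hd, hdc⟩ := List.mem_map.mp hm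
    exact char_eq_of_toNat hdc ▸ hd

-- frase.find(i) != -1 for a one-char string i means the character occurs in frase
lemma find_char (frase : String) (c : Char) :
    (PySem.Str.find frase (String.ofList [c]) ≠ -1) ↔ c ∈ frase.toList := by
  simp [PySem.Chars.find_eq_neg_one_iff, List.singleton_infix_iff]

-- B's conditional-add loop is ofList of the filtered character list
lemma foldl_add_if (p : Char → Prop) [DecidablePred p] (l : List Char) (acc : PySem.Set Char) :
    l.foldl (fun s c => if p c then PySem.Set.add s c else s) acc
      = (l.filter (fun c => decide (p c))).foldl PySem.Set.add acc := by
  induction l generalizing acc with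
  | nil => rfl
  | cons x xs ih => by_cases hx : p x <;> simp [hx, ih]

-- the two counts coincide
lemma count_eq (frase : String) :
    (["a", "b", "c", "d", "e", "f", "g", "h", "i", "j", "k", "l", "m",
      "n", "o", "p", "q", "r", "s", "t", "u", "v", "w", "x", "y", "z"] : List String).foldl
      (fun count i => if PySem.Str.find frase i ≠ -1 then count + 1 else count) (0 : Int)
    = PySem.Set.len (frase.toList.foldl (fun present c => if 'a' ≤ c ∧ c ≤ 'z' then PySem.Set.add present c else present)
        PySem.Set.empty) := by
  rw [letras_eq_map, List.foldl_map]
  rw [show (fun (count : Int) (c : Char) => if PySem.Str.find frase (String.ofList [c]) ≠ -1 then count + 1 else count)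
        = fun (count : Int) (c : Char) =>
            if (fun c => decide (PySem.Str.find frase (String.ofList [c]) ≠ -1)) c = true then count + 1 else count by
      funext a b; simp]
  rw [PySem.List.foldl_count_if, zero_add]
  simp only [PySem.Set.len]
  rw [show (PySem.Set.empty : PySem.Set Char) = [] from rfl]
  rw [foldl_add_if (fun c => 'a' ≤ c ∧ c ≤ 'z'), ← PySem.Set.ofList_eq_foldl]
  congr 1
  rw [List.countP_eq_length_filter]
  have hnd1 : (pvAlpha.filter (fun c => decide (PySem.Str.find frase (String.ofList [c]) ≠ -1))).Nodup :=
    (by decide : pvAlpha.Nodup).filter _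
  have hnd2 : (PySem.Set.ofList (frase.toList.filter (fun c => decide ('a' ≤ c ∧ c ≤ 'z')))).Nodup :=
    PySem.Set.nodup_ofList _
  refine ((List.perm_ext_iff_of_nodup hnd1 hnd2).mpr ?_).length_eq
  intro x
  simp only [List.mem_filter, PySem.Set.mem_ofList, mem_pvAlpha_iff, decide_eq_true_eq, find_char]
  tauto

-- ===== VERDICT (by name: the statement is the Claim_ definition above) =====
theorem solucao_spec : Claim_equal_solucao := by
  intro frase _
  unfold Spec_solucao solucao solucao_alt
  simp only [count_eq frase]
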